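-- pv_equiv track=rewrite | github.com/MsdArul7/FirstTask | CodeChallenge3.py | elementRemoval
-- ===== SOURCE A (Python) =====
-- def elementRemoval(N, K, A):
--     result = -404
--     count ={}
--     for num in A:
--         count[num] = count.get(num,0)+1
--     removals = 0
--     for count in count.values():
--         values = count % K
--         if values != 0:
--             removals += values
--     result = removals
--     return result
-- ===== SOURCE B (Python) =====
-- def elementRemoval(N, K, A):
--     total = 0
--     run = 0
--     prev = None
--     for x in sorted(A):
--         if run > 0 and x == prev:
--             run += 1
--         else:
--             if run > 0:
--                 total += run % K
--             run = 1
--             prev = x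
--     if run > 0:
--         total += run % K
--     return total
-- ===== Notes on version B (the rewrite author's own statement) =====
-- stated objective: alternative
-- what changed: Replaced the dict frequency table and scan over its values with sort-then-scan: one pass over sorted(A) tracking the current run of equal elements, adding run % K when the run ends.
import Mathlib
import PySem

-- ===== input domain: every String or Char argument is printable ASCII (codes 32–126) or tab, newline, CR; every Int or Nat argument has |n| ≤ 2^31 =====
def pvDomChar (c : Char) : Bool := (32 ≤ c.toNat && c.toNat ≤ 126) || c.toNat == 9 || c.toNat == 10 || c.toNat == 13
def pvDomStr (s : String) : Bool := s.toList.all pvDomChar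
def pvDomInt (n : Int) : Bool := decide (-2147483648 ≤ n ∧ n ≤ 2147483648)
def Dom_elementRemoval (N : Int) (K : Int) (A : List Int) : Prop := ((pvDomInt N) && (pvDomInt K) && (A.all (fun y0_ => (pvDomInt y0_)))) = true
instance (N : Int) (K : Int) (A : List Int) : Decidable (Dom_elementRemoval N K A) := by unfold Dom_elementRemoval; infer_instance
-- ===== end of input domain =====

-- B replaces A's dict frequency table and scan over its values by a sort plus a single
-- adjacent-run scan (alternative decomposition; not claimed faster).

-- ===== PORT A =====
def elementRemoval (N : Int) (K : Int) (A : List Int) : Int :=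
  let _result : Int := -404
  let count : PySem.Dict Int Int :=
    A.foldl (fun d num => d.insert num (d.getD num 0 + 1)) PySem.Dict.empty
  let removals : Int :=
    count.values.foldl (fun removals c =>
      let values := PySem.Int.mod c K
      if values ≠ 0 then removals + values else removals) 0
  removals

-- ===== PORT B =====
def elementRemoval_alt (N : Int) (K : Int) (A : List Int) : Int :=
  let st : Int × Int × Option Int :=
    (PySem.List.sorted A (fun x => x) false).foldl
      (fun (st : Int × Int × Option Int) x =>
        let (total, run, prev) := st
        if 0 < run ∧ prev = some x then (total, run + 1, prev)
        else ((if 0 < run then total + PySem.Int.mod run K else total), 1, some x))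
      (0, 0, none)
  if 0 < st.2.1 then st.1 + PySem.Int.mod st.2.1 K else st.1

-- ===== PRECONDITION & SPEC =====
-- Pre_ excludes exactly the inputs on which Python A raises ZeroDivisionError: K = 0 with a nonempty A.
def Pre_elementRemoval (N : Int) (K : Int) (A : List Int) : Prop := A = [] ∨ K ≠ 0
instance (N : Int) (K : Int) (A : List Int) : Decidable (Pre_elementRemoval N K A) := by unfold Pre_elementRemoval; infer_instance
def pvWitness_elementRemoval : Int × Int × List Int := (3, 2, [1, 2, 1])

def Spec_elementRemoval (N : Int) (K : Int) (A : List Int) (out : Int) : Prop := out = elementRemoval_alt N K A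
instance (N : Int) (K : Int) (A : List Int) (out : Int) : Decidable (Spec_elementRemoval N K A out) := by unfold Spec_elementRemoval; infer_instance

-- ===== CLAIM (what is proved, stated in full; the proofs are below) =====
def Claim_equal_elementRemoval : Prop := ∀ (N : Int) (K : Int) (A : List Int), Dom_elementRemoval N K A → Pre_elementRemoval N K A → Spec_elementRemoval N K A (elementRemoval N K A)

-- ===== LEMMAS AND PROOFS =====

-- Closed recursive form of B's run scan: the leading run, then recurse past it.
def scanRuns (S : List Int) (K : Int) : Int :=
  match S with
  | [] => 0
  | x :: rest =>
    PySem.Int.mod (1 + ((rest.takeWhile (fun y => y == x)).length : Int)) K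
      + scanRuns (rest.dropWhile (fun y => y == x)) K
termination_by S.length
decreasing_by
  simp only [List.length_cons]
  exact Nat.lt_succ_of_le (List.length_dropWhile_le _ _)

-- First element of each run of S.
def heads (S : List Int) : List Int :=
  match S with
  | [] => []
  | x :: rest => x :: heads (rest.dropWhile (fun y => y == x))
termination_by S.length
decreasing_by
  simp only [List.length_cons]
  exact Nat.lt_succ_of_le (List.length_dropWhile_le _ _)

lemma mem_heads (S : List Int) (z : Int) : z ∈ heads S ↔ z ∈ S := by
  induction S using heads.induct with
  | case1 => simp [heads]
  | case2 x rest ih =>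
    rw [heads]
    simp only [List.mem_cons, ih]
    constructor
    · rintro (rfl | h)
      · exact .inl rfl
      · exact .inr (List.dropWhile_sublist _ |>.mem h)
    · rintro (rfl | h)
      · exact .inl rfl
      · by_cases hz : z = x
        · exact .inl hz
        · refine .inr ?_
          have := List.takeWhile_append_dropWhile (p := fun y => y == x) (l := rest)
          rw [← this, List.mem_append] at h
          rcases h with h | h
          · exact absurd (by simpa using List.mem_takeWhile_imp h) hz
          · exact h

lemma not_mem_dropWhile_sorted (x : Int) (rest : List Int)
    (hp : rest.Pairwise (· ≤ ·)) (h : ∀ z ∈ rest, x ≤ z) :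
    x ∉ rest.dropWhile (fun y => y == x) := by
  induction rest with
  | nil => simp
  | cons z rs ih =>
    rw [List.dropWhile_cons]
    by_cases hz : z = x
    · simp only [hz, beq_self_eq_true, if_pos]
      exact ih (List.Pairwise.of_cons hp) (fun w hw => h w (List.mem_cons_of_mem _ hw))
    · have : (z == x) = false := by simpa using fun e => hz e
      rw [this]; simp only [if_neg Bool.false_ne_true, List.mem_cons]
      rintro (rfl | hm)
      · exact hz rfl
      · have hzx : z ≤ x := (List.pairwise_cons.mp hp).1 x hm
        have hxz : x ≤ z := h z (List.mem_cons_self)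
        exact hz (le_antisymm hzx hxz)

lemma nodup_heads (S : List Int) (hp : S.Pairwise (· ≤ ·)) : (heads S).Nodup := by
  induction S using heads.induct with
  | case1 => simp [heads]
  | case2 x rest ih =>
    rw [heads]
    have hp' := List.pairwise_cons.mp hp
    refine List.nodup_cons.mpr ⟨?_, ih (List.Pairwise.sublist (List.dropWhile_sublist _) hp'.2)⟩
    intro hmem
    exact not_mem_dropWhile_sorted x rest hp'.2 hp'.1 ((mem_heads _ _).mp hmem)

lemma scanRuns_eq (K : Int) (S : List Int) (hp : S.Pairwise (· ≤ ·)) :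
    scanRuns S K = ((heads S).map (fun k => PySem.Int.mod (S.count k : Int) K)).sum := by
  induction S using heads.induct with
  | case1 => simp [scanRuns, heads]
  | case2 x rest ih =>
    rw [scanRuns, heads]
    have hp' := List.pairwise_cons.mp hp
    have hpd : (rest.dropWhile (fun y => y == x)).Pairwise (· ≤ ·) :=
      List.Pairwise.sublist (List.dropWhile_sublist _) hp'.2
    have hnx : x ∉ rest.dropWhile (fun y => y == x) :=
      not_mem_dropWhile_sorted x rest hp'.2 hp'.1
    have hsplit := List.takeWhile_append_dropWhile (p := fun y => y == x) (l := rest)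
    have hct : (rest.takeWhile (fun y => y == x)).count x
        = (rest.takeWhile (fun y => y == x)).length := by
      rw [List.count_eq_length]
      intro b hb
      have hb' : (b == x) = true := List.mem_takeWhile_imp (p := fun y => y == x) hb
      exact (eq_of_beq hb').symm
    have hrest : rest.count x = (rest.takeWhile (fun y => y == x)).length := by
      conv_lhs => rw [← hsplit]
      rw [List.count_append, hct, List.count_eq_zero.mpr hnx, Nat.add_zero]
    have hcx : ((x :: rest).count x : Int)
        = 1 + ((rest.takeWhile (fun y => y == x)).length : Int) := by
      rw [List.count_cons_self, hrest]; push_cast; ring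
    have hck : ∀ k ∈ heads (rest.dropWhile (fun y => y == x)),
        ((x :: rest).count k : Int) = ((rest.dropWhile (fun y => y == x)).count k : Int) := by
      intro k hk
      have hkd : k ∈ rest.dropWhile (fun y => y == x) := (mem_heads _ _).mp hk
      have hkx : k ≠ x := fun e => hnx (e ▸ hkd)
      have h1 : (x :: rest).count k = rest.count k := by
        rw [List.count_cons_of_ne (Ne.symm hkx)]
      have h2 : (rest.takeWhile (fun y => y == x)).count k = 0 := by
        rw [List.count_eq_zero]
        intro hm
        have hm' : (k == x) = true := List.mem_takeWhile_imp (p := fun y => y == x) hm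
        exact hkx (eq_of_beq hm')
      rw [h1]
      conv_lhs => rw [← hsplit]
      rw [List.count_append, h2, Nat.zero_add]
    rw [List.map_cons, List.sum_cons, hcx, ih hpd]
    exact congrArg (HAdd.hAdd _) (congrArg List.sum (List.map_congr_left (fun k hk => by rw [hck k hk])).symm)

lemma foldl_if_mod (K : Int) (vals : List Int) (acc : Int) :
    vals.foldl (fun r c =>
      let values := PySem.Int.mod c K
      if values ≠ 0 then r + values else r) acc
      = acc + (vals.map (fun c => PySem.Int.mod c K)).sum := by
  induction vals generalizing acc with
  | nil => simp
  | cons c cs ih =>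
    simp only [List.foldl_cons, List.map_cons, List.sum_cons]
    rw [ih]
    by_cases h : PySem.Int.mod c K = 0 <;> simp [h] <;> ring

lemma elemA_eq (N K : Int) (A : List Int) :
    elementRemoval N K A
      = ((PySem.Set.ofList A).map (fun k => PySem.Int.mod (A.count k : Int) K)).sum := by
  show (((A.foldl (fun d num => d.insert num (d.getD num 0 + 1)) PySem.Dict.empty : PySem.Dict Int Int)).values.foldl (fun removals c =>
      let values := PySem.Int.mod c K
      if values ≠ 0 then removals + values else removals) 0)
      = _
  rw [PySem.Dict.foldl_insert_getD_add_one_eq_counter, foldl_if_mod]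
  have hv : (PySem.Dict.counter A).values
      = (PySem.Set.ofList A).map (fun k => (A.count k : Int)) := by
    have := PySem.Dict.items_counter A
    simp only [PySem.Dict.values, this, List.map_map]
    rfl
  rw [hv, List.map_map]
  rw [zero_add]; rfl

lemma foldl_inv (K : Int) (S : List Int) (hp : S.Pairwise (· ≤ ·)) :
    ∀ (total run : Int) (p : Int), 0 < run → (∀ z ∈ S, p ≤ z) →
      (let st := S.foldl
        (fun (st : Int × Int × Option Int) x =>
          let (total, run, prev) := st
          if 0 < run ∧ prev = some x then (total, run + 1, prev)
          else ((if 0 < run then total + PySem.Int.mod run K else total), 1, some x))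
        (total, run, some p)
       if 0 < st.2.1 then st.1 + PySem.Int.mod st.2.1 K else st.1)
      = total + PySem.Int.mod (run + ((S.takeWhile (fun y => y == p)).length : Int)) K
          + scanRuns (S.dropWhile (fun y => y == p)) K := by
  induction S with
  | nil =>
    intro total run p hrun _
    simp [scanRuns, hrun]
  | cons z rest ih =>
    intro total run p hrun hle
    have hp' := List.pairwise_cons.mp hp
    by_cases hz : p = z
    · subst hz
      simp only [List.foldl_cons, List.takeWhile_cons, List.dropWhile_cons,
        beq_self_eq_true, if_pos, hrun, and_true]
      rw [ih hp'.2 total (run + 1) p (by omega) hp'.1]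
      simp only [List.length_cons]
      push_cast
      ring_nf
    · have hbz : (z == p) = false := by simpa using fun e => hz (Eq.symm e)
      simp only [List.foldl_cons, List.takeWhile_cons, List.dropWhile_cons, hbz]
      have hcond : ¬ (0 < run ∧ (some p : Option Int) = some z) := by
        rintro ⟨-, h⟩; exact hz (Option.some.inj h)
      rw [if_neg hcond, if_pos hrun]
      rw [ih hp'.2 (total + PySem.Int.mod run K) 1 z (by omega) hp'.1]
      conv_rhs => rw [scanRuns.eq_def]
      norm_num
      ring

lemma elemB_eq (N K : Int) (A : List Int) :
    elementRemoval_alt N K A = scanRuns (PySem.List.sorted A (fun x => x) false) K := by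
  unfold elementRemoval_alt
  cases hS : PySem.List.sorted A (fun x => x) false with
  | nil => simp [scanRuns]
  | cons x rest =>
    have hp : (x :: rest).Pairwise (· ≤ ·) := hS ▸ PySem.List.sorted_pairwise A (fun x => x)
    have hp' := List.pairwise_cons.mp hp
    simp only [List.foldl_cons, lt_self_iff_false, false_and, if_neg, if_false, reduceCtorEq]
    rw [foldl_inv K rest hp'.2 0 1 x one_pos hp'.1]
    conv_rhs => rw [scanRuns.eq_def]
    norm_num

-- ===== VERDICT (by name: the statement is the Claim_ definition above) =====
theorem elementRemoval_spec : Claim_equal_elementRemoval := by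
  intro N K A _ _
  unfold Spec_elementRemoval
  rw [elemA_eq, elemB_eq, scanRuns_eq K _ (PySem.List.sorted_pairwise A (fun x => x))]
  have hperm : (heads (PySem.List.sorted A (fun x => x) false)).Perm (PySem.Set.ofList A) := by
    refine (List.perm_ext_iff_of_nodup (nodup_heads _ (PySem.List.sorted_pairwise A (fun x => x))) (PySem.Set.nodup_ofList A)).mpr ?_
    intro a
    rw [mem_heads, PySem.Set.mem_ofList, PySem.List.mem_sorted]
  have hcnt : ∀ k, ((PySem.List.sorted A (fun x => x) false).count k : Int) = (A.count k : Int) := by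
    intro k; rw [(PySem.List.sorted_perm A (fun x => x) false).count_eq]
  calc ((PySem.Set.ofList A).map (fun k => PySem.Int.mod (A.count k : Int) K)).sum
      = ((heads (PySem.List.sorted A (fun x => x) false)).map
          (fun k => PySem.Int.mod (A.count k : Int) K)).sum :=
        (hperm.map _).sum_eq.symm
    _ = ((heads (PySem.List.sorted A (fun x => x) false)).map
          (fun k => PySem.Int.mod (((PySem.List.sorted A (fun x => x) false).count k : Int)) K)).sum := by
        simp only [hcnt]
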